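-- pv_equiv track=rewrite | github.com/yangao07/NanoClu | cluster_by_splice_site.py | infer_cluster
-- ===== SOURCE A (Python) =====
-- def infer_cluster(shared_site_seq, min_clu_size):
--     cluster_site_seq = {}
--     last_site_seq = []
--     seq = []
--     clu_n = 0
--     clu_seq_n = 0
--     for i, site_seq in enumerate(shared_site_seq):
--         if len(last_site_seq) != 0 and len(set(site_seq[:-1]).intersection(set(last_site_seq[:-1]))) < 1:
--             if len(seq) >= min_clu_size:
--                 cluster_site_seq[str(last_site_seq[0])] = seq
--                 clu_n += 1
--             seq = []
--
--         seq.append(site_seq[-1])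
--         clu_seq_n += 1
--         last_site_seq = site_seq
--     if len(seq) >= min_clu_size:
--         cluster_site_seq[str(last_site_seq[0])] = seq
--         clu_n += 1
--
--     return cluster_site_seq, clu_n, clu_seq_n
-- ===== SOURCE B (Python) =====
-- def infer_cluster(shared_site_seq, min_clu_size):
--     # pass 1: partition into consecutive runs of sequences sharing splice sites
--     segments = []
--     cur = []
--     prev = None
--     for site_seq in shared_site_seq:
--         if prev is not None and not (set(site_seq[:-1]) & set(prev[:-1])):
--             segments.append(cur)
--             cur = []
--         cur.append(site_seq)
--         prev = site_seq
--     if cur: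
--         segments.append(cur)
--     # pass 2: keep the large-enough runs
--     cluster_site_seq = {}
--     clu_n = 0
--     for seg in segments:
--         if len(seg) >= min_clu_size:
--             cluster_site_seq[str(seg[-1][0])] = [e[-1] for e in seg]
--             clu_n += 1
--     return cluster_site_seq, clu_n, len(shared_site_seq)
-- ===== Notes on version B (the rewrite author's own statement) =====
-- stated objective: alternative
-- what changed: A's single stateful loop with an in-loop flush plus a duplicated post-loop flush is replaced by two passes: first partition the input into consecutive runs sharing a splice site, then build the cluster dict and count from the runs in one place.
import Mathlib
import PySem

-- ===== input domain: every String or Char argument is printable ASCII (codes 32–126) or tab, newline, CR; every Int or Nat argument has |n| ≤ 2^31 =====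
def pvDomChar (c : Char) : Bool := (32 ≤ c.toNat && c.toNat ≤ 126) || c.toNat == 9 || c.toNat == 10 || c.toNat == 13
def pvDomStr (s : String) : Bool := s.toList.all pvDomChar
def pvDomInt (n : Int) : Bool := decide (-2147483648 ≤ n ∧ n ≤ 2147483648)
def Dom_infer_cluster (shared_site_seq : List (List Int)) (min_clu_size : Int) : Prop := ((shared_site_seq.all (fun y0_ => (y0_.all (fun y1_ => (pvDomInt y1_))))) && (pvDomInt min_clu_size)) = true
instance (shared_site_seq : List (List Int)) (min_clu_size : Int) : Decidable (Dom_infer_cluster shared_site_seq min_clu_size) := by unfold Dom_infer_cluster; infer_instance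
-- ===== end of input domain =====

-- B restructures A's single stateful loop as two passes (partition into runs, then cluster the runs); objective: simpler decomposition, same cost.

-- ===== PORT A =====
-- A-side helper: the body of A's single for-loop, step for step
def pvStepA (min_clu_size : Int)
    (st : PySem.Dict String (List Int) × List Int × List Int × Int × Int)
    (site_seq : List Int) :
    PySem.Dict String (List Int) × List Int × List Int × Int × Int :=
  let (cluster, last, seq, clu_n, clu_seq_n) := st
  let (cluster, seq, clu_n) :=
    if last.length ≠ 0 ∧
        PySem.Set.len (PySem.Set.inter (PySem.Set.ofList (PySem.List.slice site_seq none (some (-1))))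
          (PySem.Set.ofList (PySem.List.slice last none (some (-1))))) < 1 then
      if PySem.List.len seq ≥ min_clu_size then
        (cluster.insert (PySem.Int.toStr (PySem.List.pyGetD last 0 0)) seq, ([] : List Int), clu_n + 1)
      else
        (cluster, ([] : List Int), clu_n)
    else (cluster, seq, clu_n)
  (cluster, site_seq, seq ++ [PySem.List.pyGetD site_seq (-1) 0], clu_n, clu_seq_n + 1)

def infer_cluster (shared_site_seq : List (List Int)) (min_clu_size : Int) :
    (List (String × List Int)) × Int × Int :=
  let st := shared_site_seq.foldl (pvStepA min_clu_size) (PySem.Dict.empty, [], [], 0, 0)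
  let (cluster, last, seq, clu_n, clu_seq_n) := st
  if PySem.List.len seq ≥ min_clu_size then
    ((cluster.insert (PySem.Int.toStr (PySem.List.pyGetD last 0 0)) seq).items, clu_n + 1, clu_seq_n)
  else (cluster.items, clu_n, clu_seq_n)

-- ===== PORT B =====
-- B-side helper: pass 1's loop body — extend the current run or start a new one
def pvStepSeg (st : List (List (List Int)) × List (List Int) × Option (List Int))
    (site_seq : List Int) :
    List (List (List Int)) × List (List Int) × Option (List Int) :=
  let (segs, cur, prev) := st
  let (segs, cur) :=
    match prev with
    | none => (segs, cur)
    | some p =>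
      if (PySem.Set.inter (PySem.Set.ofList (PySem.List.slice site_seq none (some (-1))))
          (PySem.Set.ofList (PySem.List.slice p none (some (-1))))).isEmpty then
        (segs ++ [cur], ([] : List (List Int)))
      else (segs, cur)
  (segs, cur ++ [site_seq], some site_seq)

-- B-side helper: pass 2's loop body — keep a run iff it is large enough
def pvStepClu (min_clu_size : Int) (st : PySem.Dict String (List Int) × Int)
    (seg : List (List Int)) : PySem.Dict String (List Int) × Int :=
  if PySem.List.len seg ≥ min_clu_size then
    (st.1.insert (PySem.Int.toStr (PySem.List.pyGetD (PySem.List.pyGetD seg (-1) []) 0 0))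
      (seg.map (fun e => PySem.List.pyGetD e (-1) 0)), st.2 + 1)
  else st

def infer_cluster_alt (shared_site_seq : List (List Int)) (min_clu_size : Int) :
    (List (String × List Int)) × Int × Int :=
  let st := shared_site_seq.foldl pvStepSeg ([], [], none)
  let segments := if st.2.1.isEmpty then st.1 else st.1 ++ [st.2.1]
  let res := segments.foldl (pvStepClu min_clu_size) (PySem.Dict.empty, 0)
  (res.1.items, res.2, PySem.List.len shared_site_seq)

-- ===== PRECONDITION & SPEC =====
-- Pre_ excludes exactly the inputs where A raises IndexError: any empty inner list
-- (site_seq[-1] raises), and the empty outer list with min_clu_size ≤ 0 (last_site_seq[0] raises).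
def Pre_infer_cluster (shared_site_seq : List (List Int)) (min_clu_size : Int) : Prop :=
  (∀ s ∈ shared_site_seq, s ≠ []) ∧ (shared_site_seq = [] → 1 ≤ min_clu_size)
instance (shared_site_seq : List (List Int)) (min_clu_size : Int) : Decidable (Pre_infer_cluster shared_site_seq min_clu_size) := by unfold Pre_infer_cluster; infer_instance
def pvWitness_infer_cluster : List (List Int) × Int := ([[1, 2], [2, 3], [7, 8]], 2)

def Spec_infer_cluster (shared_site_seq : List (List Int)) (min_clu_size : Int) (out : (List (String × List Int)) × Int × Int) : Prop := out = infer_cluster_alt shared_site_seq min_clu_size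
instance (shared_site_seq : List (List Int)) (min_clu_size : Int) (out : (List (String × List Int)) × Int × Int) : Decidable (Spec_infer_cluster shared_site_seq min_clu_size out) := by unfold Spec_infer_cluster; infer_instance

-- ===== CLAIM (what is proved, stated in full; the proofs are below) =====
def Claim_equal_infer_cluster : Prop := ∀ (shared_site_seq : List (List Int)) (min_clu_size : Int), Dom_infer_cluster shared_site_seq min_clu_size → Pre_infer_cluster shared_site_seq min_clu_size → Spec_infer_cluster shared_site_seq min_clu_size (infer_cluster shared_site_seq min_clu_size)

-- ===== LEMMAS AND PROOFS =====

-- last element of a site sequence, as both ports read it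
def pvLastE (e : List Int) : Int := PySem.List.pyGetD e (-1) 0

-- break test: the two consecutive sequences share no splice site
def pvBrk (site_seq p : List Int) : Bool :=
  (PySem.Set.inter (PySem.Set.ofList (PySem.List.slice site_seq none (some (-1))))
    (PySem.Set.ofList (PySem.List.slice p none (some (-1))))).isEmpty

-- the runs contributed by the rest of the input, given the current (nonempty) run
def pvRuns (cur : List (List Int)) : List (List Int) → List (List (List Int))
  | [] => [cur]
  | s :: rest =>
    if pvBrk s (cur.getLastD []) then cur :: pvRuns [s] rest else pvRuns (cur ++ [s]) rest

lemma pvGetLastD_eq (cur : List (List Int)) (h : cur ≠ []) :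
    cur.getLastD [] = cur.getLast h := by
  cases cur with
  | nil => simp at h
  | cons a l => rfl

lemma pvGetLastD_mem (cur : List (List Int)) (h : cur ≠ []) : cur.getLastD [] ∈ cur := by
  cases cur with
  | nil => simp at h
  | cons a l => exact List.getLast_mem _

lemma pvGetLastD_singleton (s : List Int) : ([s] : List (List Int)).getLastD [] = s := by simp

lemma pvGetLastD_concat (cur : List (List Int)) (s : List Int) :
    (cur ++ [s]).getLastD [] = s := by simp

lemma pvMap_lastE (cur : List (List Int)) :
    List.map pvLastE cur = List.map (fun e => PySem.List.pyGetD e (-1) 0) cur := rfl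

lemma pvBrk_iff (s p : List Int) :
    (PySem.Set.len (PySem.Set.inter (PySem.Set.ofList (PySem.List.slice s none (some (-1))))
      (PySem.Set.ofList (PySem.List.slice p none (some (-1))))) < 1) ↔ pvBrk s p = true := by
  simp [pvBrk, PySem.Set.len]

-- pass 1 of B computes pvRuns
lemma pvB_fold (xs : List (List Int)) :
    ∀ (segs : List (List (List Int))) (cur : List (List Int)), cur ≠ [] →
    (let st := xs.foldl pvStepSeg (segs, cur, some (cur.getLastD []))
     if st.2.1.isEmpty then st.1 else st.1 ++ [st.2.1]) = segs ++ pvRuns cur xs := by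
  induction xs with
  | nil =>
    intro segs cur hcur
    simp [pvRuns, List.isEmpty_iff, hcur]
  | cons s rest ih =>
    intro segs cur hcur
    show (let st := rest.foldl pvStepSeg (pvStepSeg (segs, cur, some (cur.getLastD [])) s)
          if st.2.1.isEmpty then st.1 else st.1 ++ [st.2.1]) = segs ++ pvRuns cur (s :: rest)
    by_cases hb : pvBrk s (cur.getLastD []) = true
    · have hstep : pvStepSeg (segs, cur, some (cur.getLastD [])) s
          = (segs ++ [cur], [s], some s) := by
        simp [pvStepSeg, pvBrk] at hb ⊢
        simp [hb]
      rw [hstep]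
      have h2 := ih (segs ++ [cur]) [s] (by simp)
      rw [pvGetLastD_singleton] at h2
      rw [h2, pvRuns, if_pos hb]
      simp
    · have hstep : pvStepSeg (segs, cur, some (cur.getLastD [])) s
          = (segs, cur ++ [s], some s) := by
        simp [pvStepSeg, pvBrk] at hb ⊢
        simp [hb]
      rw [hstep]
      have h2 := ih segs (cur ++ [s]) (by simp)
      rw [pvGetLastD_concat] at h2
      rw [h2, pvRuns, if_neg hb]

-- A's loop + final flush equals B's pass 2 over the remaining runs
lemma pvA_fold (minc : Int) (xs : List (List Int)) :
    ∀ (d : PySem.Dict String (List Int)) (n m : Int) (cur : List (List Int)),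
    cur ≠ [] → (∀ e ∈ cur, e ≠ []) → (∀ e ∈ xs, e ≠ []) →
    (let st := xs.foldl (pvStepA minc) (d, cur.getLastD [], cur.map pvLastE, n, m)
     if PySem.List.len st.2.2.1 ≥ minc then
       ((st.1.insert (PySem.Int.toStr (PySem.List.pyGetD st.2.1 0 0)) st.2.2.1).items, st.2.2.2.1 + 1, st.2.2.2.2)
     else (st.1.items, st.2.2.2.1, st.2.2.2.2))
    = (let r := (pvRuns cur xs).foldl (pvStepClu minc) (d, n)
       (r.1.items, r.2, m + xs.length)) := by
  induction xs with
  | nil =>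
    intro d n m cur hcur hce _
    have hlast : PySem.List.pyGetD cur (-1) [] = cur.getLastD [] := by
      rw [PySem.List.pyGetD_neg_one cur [] hcur, pvGetLastD_eq cur hcur]
    simp only [List.foldl_nil, pvRuns, List.foldl_cons, pvStepClu,
      PySem.List.len_eq, List.length_map, hlast]
    split <;> simp [pvMap_lastE]
  | cons s rest ih =>
    intro d n m cur hcur hce hxs
    have hlastne : cur.getLastD [] ≠ [] := hce _ (pvGetLastD_mem cur hcur)
    have hlast : PySem.List.pyGetD cur (-1) [] = cur.getLastD [] := by
      rw [PySem.List.pyGetD_neg_one cur [] hcur, pvGetLastD_eq cur hcur]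
    show (let st := rest.foldl (pvStepA minc) (pvStepA minc (d, cur.getLastD [], cur.map pvLastE, n, m) s)
          if PySem.List.len st.2.2.1 ≥ minc then
            ((st.1.insert (PySem.Int.toStr (PySem.List.pyGetD st.2.1 0 0)) st.2.2.1).items, st.2.2.2.1 + 1, st.2.2.2.2)
          else (st.1.items, st.2.2.2.1, st.2.2.2.2)) = _
    by_cases hb : pvBrk s (cur.getLastD []) = true
    · -- a new run starts: A flushes exactly pvStepClu's step
      have hcond : (cur.getLastD []).length ≠ 0 ∧
          PySem.Set.len (PySem.Set.inter (PySem.Set.ofList (PySem.List.slice s none (some (-1))))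
            (PySem.Set.ofList (PySem.List.slice (cur.getLastD []) none (some (-1))))) < 1 := by
        refine ⟨by simpa using hlastne, (pvBrk_iff s (cur.getLastD [])).mpr hb⟩
      have hstep : pvStepA minc (d, cur.getLastD [], cur.map pvLastE, n, m) s
          = (let r := pvStepClu minc (d, n) cur
             (r.1, s, [pvLastE s], r.2, m + 1)) := by
        simp only [pvStepA]
        rw [if_pos hcond]
        simp only [pvStepClu, PySem.List.len_eq, List.length_map, hlast]
        split <;> simp [pvMap_lastE, pvLastE]
      rw [hstep]
      have h2 := ih (pvStepClu minc (d, n) cur).1 (pvStepClu minc (d, n) cur).2 (m + 1) [s]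
        (by simp) (by simpa using hxs s (by simp)) (fun e he => hxs e (by simp [he]))
      rw [pvGetLastD_singleton] at h2
      simp only [List.map_singleton] at h2
      rw [h2, pvRuns, if_pos hb]
      simp only [List.foldl_cons, List.length_cons, Prod.mk.injEq]
      exact ⟨trivial, trivial, by push_cast; ring⟩
    · -- run continues
      have hcond : ¬ ((cur.getLastD []).length ≠ 0 ∧
          PySem.Set.len (PySem.Set.inter (PySem.Set.ofList (PySem.List.slice s none (some (-1))))
            (PySem.Set.ofList (PySem.List.slice (cur.getLastD []) none (some (-1))))) < 1) := by
        intro h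
        exact hb ((pvBrk_iff s (cur.getLastD [])).mp h.2)
      have hstep : pvStepA minc (d, cur.getLastD [], cur.map pvLastE, n, m) s
          = (d, s, (cur ++ [s]).map pvLastE, n, m + 1) := by
        simp only [pvStepA]
        rw [if_neg hcond]
        simp [pvLastE]
      rw [hstep]
      have h2 := ih d n (m + 1) (cur ++ [s]) (by simp)
        (by intro e he; rcases List.mem_append.mp he with h | h
            · exact hce e h
            · simpa using hxs e (by simp [List.mem_singleton.mp h]))
        (fun e he => hxs e (by simp [he]))
      rw [pvGetLastD_concat] at h2
      rw [h2, pvRuns, if_neg hb]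
      simp only [List.length_cons, Prod.mk.injEq]
      exact ⟨trivial, trivial, by push_cast; ring⟩

-- ===== VERDICT (by name: the statement is the Claim_ definition above) =====
theorem infer_cluster_spec : Claim_equal_infer_cluster := by
  intro xs minc _ hpre
  unfold Spec_infer_cluster
  obtain ⟨hne, hemp⟩ := hpre
  cases xs with
  | nil =>
    have h1 : ¬ (PySem.List.len ([] : List Int) ≥ minc) := by
      have := hemp rfl
      simp [PySem.List.len]
      omega
    show infer_cluster [] minc = infer_cluster_alt [] minc
    unfold infer_cluster infer_cluster_alt
    simp only [List.foldl_nil, if_neg h1]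
    rfl
  | cons s rest =>
    have hs : s ≠ [] := hne s (by simp)
    have hfirst : pvStepA minc (PySem.Dict.empty, [], [], 0, 0) s
        = (PySem.Dict.empty, s, [pvLastE s], 0, 1) := by
      simp [pvStepA, pvLastE]
    have hA := pvA_fold minc rest PySem.Dict.empty 0 1 [s] (by simp)
      (by simpa using hs) (fun e he => hne e (by simp [he]))
    rw [pvGetLastD_singleton] at hA
    simp only [List.map_singleton] at hA
    have hB := pvB_fold rest [] [s] (by simp)
    rw [pvGetLastD_singleton] at hB
    simp only [List.nil_append] at hB
    show infer_cluster (s :: rest) minc = infer_cluster_alt (s :: rest) minc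
    unfold infer_cluster infer_cluster_alt
    simp only [List.foldl_cons, hfirst]
    have hBstep : pvStepSeg ([], [], none) s = ([], [s], some s) := by
      simp [pvStepSeg]
    rw [hBstep, hA, hB]
    simp only [PySem.List.len_eq, List.length_cons, Prod.mk.injEq]
    exact ⟨trivial, trivial, by push_cast; ring⟩
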